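/- GENERATED by farm/worked/mk_tree_copies.py from farm/worked/vorbis_decode_packet_rest.COMPOSITION/Proof.lean (a worked proof of the farm's unit `vorbis_decode_packet_rest.COMPOSITION`,
   accepted by the verdict) — do not edit. -/
import Vorbis.Spec.Units.vorbis_decode_packet_rest_COMPOSITION

/-
  THE COMPOSITION OF vorbis_decode_packet_rest (S6's proof, in the farm's format): the sixteen segment statements `Seg1 … Seg16` of
  Vorbis/Spec/PacketRest.lean give the function's contract. Every exit assertion is the entry assertion of a successor, and the two
  loops that cross segment boundaries have their measures in the assertions (`16 − i` from `At2.i_le` / HD1, `31 − j` from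
  `At3.j_le` / FL4).
-/
namespace Vorbis.Spec.Worked.vorbis_decode_packet_rest_COMPOSITION
open Vorbis.Spec.vorbis_decode_packet_rest_COMPOSITION (Statement)
open X86 X86.User Asan Vorbis Vorbis.Spec Vorbis.Spec.vorbis_decode_packet_rest

section Composition
variable {Lay : Layout} {μ : Microarch} {u₀ : State} {others : List Obj} {frames : List (Nat × FrameLayout)} {len : Nat}
  {Ar : Arena} {stored room : Int} {mode : Nat} {ysz : Nat → Nat} {u : State} {ret : Word}

/-- The goal of every tail of the packet_rest_composes_w: the function has returned. -/
abbrev PrReturns_w (Lay : Layout) (μ : Microarch) (u₀ : State) (others : List Obj) (frames : List (Nat × FrameLayout)) (len : Nat)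
    (Ar : Arena) (stored room : Int) (mode : Nat) (ysz : Nat → Nat) (u : State) (ret : Word) (v : State) : Prop :=
  ReachVia Lay μ Vorbis.WayInv v
    (Returned (Vorbis.conv u₀) (vorbis_decode_packet_rest.spec others frames len Ar stored room mode ysz) u ret)

/-- The channel count of a cut point's memory is at most 16 (HD1). -/
theorem pr_channels_le_w {v : State} (h : Frame u₀ others frames len Ar stored room mode ysz u ret v) :
    stb_vorbis.channels v.mem (fOf u) ≤ 16 :=
  (Real.VorbisOK.config h.inv.fb.vorbis).header.HD1.2

/-- The partition count of a floor of a cut point's memory is at most 31 (FL4). -/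
theorem pr_partitions_le_w {v : State} (h : Frame u₀ others frames len Ar stored room mode ysz u ret v) {g : Nat}
    (hg : IsFloor v.mem (fOf u) g) : Floor1.partitions v.mem g ≤ 31 :=
  ((Real.VorbisOK.config h.inv.fb.vorbis).floor.floor hg).FL4

/-- From the entry of the epilogue. -/
theorem pr_from15_w (h15 : Seg15 Lay μ u₀) {v : State} (h : At15 u₀ others frames len Ar stored room mode ysz u ret v) :
    PrReturns_w Lay μ u₀ others frames len Ar stored room mode ysz u ret v :=
  h15 others frames len Ar stored room mode ysz u ret v h

/-- From the end of the floor loop: segments .8 … .15 in a row. -/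
theorem pr_from8_w (h8 : Seg8 Lay μ u₀) (h9 : Seg9 Lay μ u₀) (h10 : Seg10 Lay μ u₀) (h11 : Seg11 Lay μ u₀) (h12 : Seg12 Lay μ u₀)
    (h13 : Seg13 Lay μ u₀) (h14 : Seg14 Lay μ u₀) (h15 : Seg15 Lay μ u₀) {v : State}
    (h : At8 u₀ others frames len Ar stored room mode ysz u ret v) :
    PrReturns_w Lay μ u₀ others frames len Ar stored room mode ysz u ret v := by
  refine (h8 others frames len Ar stored room mode ysz u ret v h).trans ?_
  intro v9 a9
  refine (h9 others frames len Ar stored room mode ysz u ret v9 a9).trans ?_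
  intro v10 a10
  refine (h10 others frames len Ar stored room mode ysz u ret v10 a10).trans ?_
  intro v11 a11
  refine (h11 others frames len Ar stored room mode ysz u ret v11 a11).trans ?_
  intro v12 a12
  refine (h12 others frames len Ar stored room mode ysz u ret v12 a12).trans ?_
  intro v13 a13
  refine (h13 others frames len Ar stored room mode ysz u ret v13 a13).trans ?_
  intro v14 a14
  refine (h14 others frames len Ar stored room mode ysz u ret v14 a14).trans ?_
  intro v15 a15
  exact pr_from15_w h15 a15

/-- **The partition loop** (.3 → .4 → .3): from its head with counter `j` the machine reaches the entry of segment .5. Measure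
`31 − j` (`At3.j_le`, FL4). -/
theorem pr_partLoop_w (h3 : Seg3 Lay μ u₀) (h4 : Seg4 Lay μ u₀) (i : Nat) :
    ∀ (k j : Nat), j + k = 31 → ∀ v, At3 u₀ others frames len Ar stored room mode ysz u ret i j v →
      ReachVia Lay μ Vorbis.WayInv v (fun w => At5 u₀ others frames len Ar stored room mode ysz u ret i w) := by
  intro k
  induction k with
  | zero =>
    intro j hj v a3
    refine (h3 others frames len Ar stored room mode ysz u ret i j v a3).trans ?_
    intro w hw
    rcases hw with a5 | a4
    · exact ReachVia.done a5
    · have hp := pr_partitions_le_w a4.toStable.toFrame a4.g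
      have hlt := a4.j_lt
      omega
  | succ k ih =>
    intro j hj v a3
    refine (h3 others frames len Ar stored room mode ysz u ret i j v a3).trans ?_
    intro w hw
    rcases hw with a5 | a4
    · exact ReachVia.done a5
    · refine (h4 others frames len Ar stored room mode ysz u ret i j w a4).trans ?_
      intro w' a3'
      exact ih (j + 1) (by omega) w' a3'

/-- **The channel loop** (.2 → .3/.4 → .5 → .6 → .7 → .2): from its head with counter `i` the function returns. Measure `16 − i`
(`At2.i_le`, `At3.i_lt`, HD1). -/
theorem pr_chanLoop_w (h2 : Seg2 Lay μ u₀) (h3 : Seg3 Lay μ u₀) (h4 : Seg4 Lay μ u₀) (h5 : Seg5 Lay μ u₀) (h6 : Seg6 Lay μ u₀)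
    (h7 : Seg7 Lay μ u₀) (h8 : Seg8 Lay μ u₀) (h9 : Seg9 Lay μ u₀) (h10 : Seg10 Lay μ u₀) (h11 : Seg11 Lay μ u₀)
    (h12 : Seg12 Lay μ u₀) (h13 : Seg13 Lay μ u₀) (h14 : Seg14 Lay μ u₀) (h15 : Seg15 Lay μ u₀) (h16 : Seg16 Lay μ u₀) :
    ∀ (k i : Nat), i + k = 16 → ∀ v, At2 u₀ others frames len Ar stored room mode ysz u ret i v →
      PrReturns_w Lay μ u₀ others frames len Ar stored room mode ysz u ret v := by
  intro k
  induction k with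
  | zero =>
    intro i hi v a2
    refine (h2 others frames len Ar stored room mode ysz u ret i v a2).trans ?_
    intro w hw
    rcases hw with a8 | a16 | a7 | a3
    · exact pr_from8_w h8 h9 h10 h11 h12 h13 h14 h15 a8
    · exact (h16 others frames len Ar stored room mode ysz u ret w a16).trans (fun w' a15 => pr_from15_w h15 a15)
    · have hc := pr_channels_le_w a7.toStable.toFrame
      have hlt := a7.i_lt
      omega
    · have hc := pr_channels_le_w a3.toStable.toFrame
      have hlt := a3.i_lt
      omega
  | succ k ih =>
    intro i hi v a2
    have next : ∀ w, (At7a u₀ others frames len Ar stored room mode ysz u ret i w ∨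
        At7b u₀ others frames len Ar stored room mode ysz u ret i w) →
        PrReturns_w Lay μ u₀ others frames len Ar stored room mode ysz u ret w := by
      intro w a7
      refine (h7 others frames len Ar stored room mode ysz u ret i w a7).trans ?_
      intro w' a2'
      exact ih (i + 1) (by omega) w' a2'
    refine (h2 others frames len Ar stored room mode ysz u ret i v a2).trans ?_
    intro w hw
    rcases hw with a8 | a16 | a7 | a3
    · exact pr_from8_w h8 h9 h10 h11 h12 h13 h14 h15 a8
    · exact (h16 others frames len Ar stored room mode ysz u ret w a16).trans (fun w' a15 => pr_from15_w h15 a15)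
    · exact next w (Or.inl a7)
    · have hp := pr_partitions_le_w a3.toStable.toFrame a3.g
      have hj := a3.j_le
      refine (pr_partLoop_w h3 h4 i 31 0 (by omega) w a3).trans ?_
      intro w5 a5
      refine (h5 others frames len Ar stored room mode ysz u ret i w5 a5).trans ?_
      intro w6 hw6
      rcases hw6 with a7 | a6
      · exact next w6 (Or.inl a7)
      · refine (h6 others frames len Ar stored room mode ysz u ret i w6 a6).trans ?_
        intro w7 a7
        exact next w7 (Or.inr a7)

/-- **THE COMPOSITION**: the sixteen segment statements give the function's contract. -/
theorem packet_rest_composes_w (h1 : Seg1 Lay μ u₀) (h2 : Seg2 Lay μ u₀) (h3 : Seg3 Lay μ u₀) (h4 : Seg4 Lay μ u₀) (h5 : Seg5 Lay μ u₀)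
    (h6 : Seg6 Lay μ u₀) (h7 : Seg7 Lay μ u₀) (h8 : Seg8 Lay μ u₀) (h9 : Seg9 Lay μ u₀) (h10 : Seg10 Lay μ u₀)
    (h11 : Seg11 Lay μ u₀) (h12 : Seg12 Lay μ u₀) (h13 : Seg13 Lay μ u₀) (h14 : Seg14 Lay μ u₀) (h15 : Seg15 Lay μ u₀)
    (h16 : Seg16 Lay μ u₀) (others : List Obj) (frames : List (Nat × FrameLayout)) (len : Nat) (Ar : Arena)
    (stored room : Int) (mode : Nat) (ysz : Nat → Nat) :
    Calls Lay μ Vorbis.WayInv (Vorbis.conv u₀) Vorbis.L.vorbis_decode_packet_rest.entry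
      (vorbis_decode_packet_rest.spec others frames len Ar stored room mode ysz) := by
  intro u ret he hpre
  refine (h1 others frames len Ar stored room mode ysz u ret he hpre).trans ?_
  intro v a2
  exact pr_chanLoop_w h2 h3 h4 h5 h6 h7 h8 h9 h10 h11 h12 h13 h14 h15 h16 16 0 (by omega) v a2

end Composition
end Vorbis.Spec.Worked.vorbis_decode_packet_rest_COMPOSITION

theorem Vorbis.Spec.Worked.vorbis_decode_packet_rest_COMPOSITION_ok : Vorbis.Spec.vorbis_decode_packet_rest_COMPOSITION.Statement := by
  intro Lay _hLay μ _hμ u₀ h1 h2 h3 h4 h5 h6 h7 h8 h9 h10 h11 h12 h13 h14 h15 h16 others frames len Ar stored room mode ysz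
  exact Vorbis.Spec.Worked.vorbis_decode_packet_rest_COMPOSITION.packet_rest_composes_w h1 h2 h3 h4 h5 h6 h7 h8 h9 h10 h11 h12 h13 h14 h15 h16
    others frames len Ar stored room mode ysz
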